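-- pv_equiv track=rewrite | github.com/humeya/lfibypasser | lfibypasser.py | double_encode
-- ===== SOURCE A (Python) =====
-- forbidden = [".","-","/","%"]
--
-- def double_encode(payload):
--         first_encode = ""
--         second_encode = ""
--
--         for i in payload:
--                 if i in forbidden:
--                         allowed = i.encode().hex()
--                         bypassed = "%"+allowed
--                         first_encode = first_encode + bypassed
--                 else:
--                         first_encode = first_encode + i
--
--         for i in first_encode:
--                 if i in forbidden:
--                         allowed = i.encode().hex()
--                         bypassed = "%"+allowed
--                         second_encode = second_encode + bypassed
--                 else:
--                         second_encode = second_encode + i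
--
--         return(second_encode)
-- ===== SOURCE B (Python) =====
-- ENC = {".": "%252e", "-": "%252d", "/": "%252f", "%": "%2525"}
--
-- def double_encode(payload):
--     return "".join(ENC.get(c, c) for c in payload)
-- ===== Notes on version B (the rewrite author's own statement) =====
-- stated objective: simpler
-- what changed: Replaces A's two sequential encode passes (each a loop building the string by repeated concatenation) by a single join over the original payload using a precomputed table mapping each forbidden character directly to its doubly-encoded form.
import Mathlib
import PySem

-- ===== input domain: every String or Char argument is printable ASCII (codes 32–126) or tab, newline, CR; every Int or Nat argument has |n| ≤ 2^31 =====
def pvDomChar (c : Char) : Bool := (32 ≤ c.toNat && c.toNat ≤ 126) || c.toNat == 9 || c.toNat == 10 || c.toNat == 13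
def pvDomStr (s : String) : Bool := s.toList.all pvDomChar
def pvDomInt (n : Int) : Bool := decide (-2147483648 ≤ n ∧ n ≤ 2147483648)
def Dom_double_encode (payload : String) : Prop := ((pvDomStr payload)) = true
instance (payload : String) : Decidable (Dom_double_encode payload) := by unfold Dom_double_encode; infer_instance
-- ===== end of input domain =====

-- B replaces A's two sequential encode-and-concatenate passes with a single join over the
-- original payload using a table mapping each forbidden character to its doubly-encoded form
-- (objective: simpler).

-- ===== PORT A =====
-- forbidden = [".","-","/","%"]  (membership test on one-character strings ≡ on chars)
def pvForbidden : List Char := ['.', '-', '/', '%']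

def pvHexDigit (n : Nat) : Char := -- lowercase hex digit, as produced by bytes.hex()
  if n < 10 then Char.ofNat (48 + n) else Char.ofNat (87 + n)

-- i.encode().hex() for a one-character ASCII string i: the two lowercase hex digits of its byte
def pvHex (c : Char) : String := String.ofList [pvHexDigit (c.toNat / 16), pvHexDigit (c.toNat % 16)]

-- one iteration of A's loop body: the string appended to the accumulator for character i
def pvEncA (c : Char) : String :=
  if c ∈ pvForbidden then "%" ++ pvHex c else String.ofList [c]

-- one of A's loops: start from "" and append pvEncA of each character in order
def pvPassA (s : String) : String :=
  s.toList.foldl (fun acc c => acc ++ pvEncA c) ""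

def double_encode (payload : String) : String :=
  pvPassA (pvPassA payload)   -- first_encode, then second_encode over first_encode

-- ===== PORT B =====
-- ENC = {".": "%252e", "-": "%252d", "/": "%252f", "%": "%2525"}
def pvENC : PySem.Dict Char String :=
  PySem.Dict.mk [('.', "%252e"), ('-', "%252d"), ('/', "%252f"), ('%', "%2525")]

def double_encode_alt (payload : String) : String :=
  PySem.Str.join "" (payload.toList.map (fun c => PySem.Dict.getD pvENC c (String.ofList [c])))

-- ===== PRECONDITION & SPEC =====
def Spec_double_encode (payload : String) (out : String) : Prop := out = double_encode_alt payload
instance (payload : String) (out : String) : Decidable (Spec_double_encode payload out) := by unfold Spec_double_encode; infer_instance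

-- ===== CLAIM (what is proved, stated in full; the proofs are below) =====
def Claim_equal_double_encode : Prop := ∀ (payload : String), Dom_double_encode payload → Spec_double_encode payload (double_encode payload)

-- ===== LEMMAS AND PROOFS =====

-- list-level image of one A-pass step
def pvFA (c : Char) : List Char := (pvEncA c).toList

lemma pvPassA_toList (s : String) : (pvPassA s).toList = s.toList.flatMap pvFA := by
  unfold pvPassA
  generalize s.toList = l
  induction l using List.reverseRecOn with
  | nil => simp
  | append_singleton xs x ih => simp [ih, pvFA]

lemma pvJoin_empty_toList (ps : List String) :
    (PySem.Str.join "" ps).toList = (ps.map String.toList).flatten := by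
  rw [PySem.Str.toList_join]
  induction ps with
  | nil => simp [PySem.Chars.join, List.intercalate]
  | cons p ps ih =>
      cases ps with
      | nil => simp [PySem.Chars.join, List.intercalate]
      | cons q qs => simpa [PySem.Chars.join_cons_cons] using ih

-- per-character agreement: encoding twice with A's rule = B's table entry
lemma pvChar_eq (c : Char) :
    (pvFA c).flatMap pvFA = (PySem.Dict.getD pvENC c (String.ofList [c])).toList := by
  by_cases h1 : c = '.'
  · subst h1; decide
  by_cases h2 : c = '-'
  · subst h2; decide
  by_cases h3 : c = '/'
  · subst h3; decide
  by_cases h4 : c = '%'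
  · subst h4; decide
  have hf : c ∉ pvForbidden := by
    simp [pvForbidden, h1, h2, h3, h4]
  have hd : PySem.Dict.getD pvENC c (String.ofList [c]) = String.ofList [c] := by
    simp only [pvENC, PySem.Dict.getD, PySem.Dict.get?]
    have e1 : ('.' == c) = false := by simp [Ne.symm h1]
    have e2 : ('-' == c) = false := by simp [Ne.symm h2]
    have e3 : ('/' == c) = false := by simp [Ne.symm h3]
    have e4 : ('%' == c) = false := by simp [Ne.symm h4]
    simp [List.find?, e1, e2, e3, e4]
  rw [hd]
  simp [pvFA, pvEncA, hf]

-- ===== VERDICT (by name: the statement is the Claim_ definition above) =====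
theorem double_encode_spec : Claim_equal_double_encode := by
  intro payload _
  unfold Spec_double_encode double_encode double_encode_alt
  apply String.toList_injective
  rw [pvPassA_toList, pvPassA_toList, pvJoin_empty_toList, List.flatMap_assoc]
  simp only [List.map_map, ← List.flatMap_def]
  exact List.flatMap_congr (fun c _ => pvChar_eq c)
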